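-- pv_equiv track=rewrite | github.com/SaschaVII/Advent-Of-Code | Day 10/main.py | lights_match
-- ===== SOURCE A (Python) =====
-- def lights_match(lights: str, buttons_pressed: list[set[int]]) -> bool:
--     resulting_lights: str = ""
--     for i in range(len(lights)):
--         count = 0
--         for button in buttons_pressed:
--             count += 1 if i in button else 0
--         resulting_lights += "." if count % 2 == 0 else "#"
--     return lights == resulting_lights
-- ===== SOURCE B (Python) =====
-- def lights_match(lights: str, buttons_pressed: list[set[int]]) -> bool:
--     # One pass over the buttons builds a parity counter; one pass over the
--     # string checks each light, instead of scanning every button per light.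
--     toggles = []
--     for button in buttons_pressed:
--         toggles.extend(dict.fromkeys(button))  # distinct elements of the button
--     parity = {}
--     for i in toggles:
--         parity[i] = parity.get(i, 0) + 1
--     for idx, ch in enumerate(lights):
--         if ch != ('.' if parity.get(idx, 0) % 2 == 0 else '#'):
--             return False
--     return True
-- ===== Notes on version B (the rewrite author's own statement) =====
-- stated objective: faster
-- what changed: B builds a parity counter in one pass over the buttons' (deduplicated) elements and then checks each light once, instead of A's scan of every button for every light position.
import Mathlib
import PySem

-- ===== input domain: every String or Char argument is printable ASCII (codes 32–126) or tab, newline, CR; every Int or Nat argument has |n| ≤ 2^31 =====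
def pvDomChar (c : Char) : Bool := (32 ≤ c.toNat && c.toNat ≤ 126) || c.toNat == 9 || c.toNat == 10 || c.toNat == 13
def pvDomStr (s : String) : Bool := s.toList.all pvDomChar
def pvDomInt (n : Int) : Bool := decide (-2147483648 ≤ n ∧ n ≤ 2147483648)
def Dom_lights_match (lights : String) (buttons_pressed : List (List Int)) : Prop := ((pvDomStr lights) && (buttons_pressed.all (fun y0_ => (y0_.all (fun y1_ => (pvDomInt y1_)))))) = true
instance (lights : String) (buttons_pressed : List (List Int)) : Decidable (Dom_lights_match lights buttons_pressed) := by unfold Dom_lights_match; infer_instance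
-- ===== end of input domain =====

-- B replaces A's per-light scan of every button by one parity counter built in a
-- single pass over the buttons, then a single pass over the string (objective: faster).

-- ===== PORT A =====
-- for i in range(len(lights)): count over buttons; append '.' or '#'; compare
def lights_match (lights : String) (buttons_pressed : List (List Int)) : Bool :=
  let resulting_lights : List Char :=
    (PySem.List.pyRange 0 (PySem.Str.len lights) 1).foldl
      (fun acc i =>
        let count : Int :=
          buttons_pressed.foldl (fun c button => c + (if button.contains i then 1 else 0)) 0
        acc ++ [if PySem.Int.mod count 2 == 0 then '.' else '#'])
      []
  lights.toList == resulting_lights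

-- ===== PORT B =====
-- toggles.extend(dict.fromkeys(button)); parity counter dict; check each light once
def lights_match_alt (lights : String) (buttons_pressed : List (List Int)) : Bool :=
  let toggles : List Int :=
    buttons_pressed.foldl (fun acc button => acc ++ PySem.List.dedup button) []
  let parity : PySem.Dict Int Int :=
    toggles.foldl (fun d i => d.insert i (d.getD i 0 + 1)) PySem.Dict.empty
  (PySem.List.enumerate lights.toList 0).all
    (fun p => p.2 == (if PySem.Int.mod (parity.getD p.1 0) 2 == 0 then '.' else '#'))

-- ===== PRECONDITION & SPEC =====
def Spec_lights_match (lights : String) (buttons_pressed : List (List Int)) (out : Bool) : Prop := out = lights_match_alt lights buttons_pressed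
instance (lights : String) (buttons_pressed : List (List Int)) (out : Bool) : Decidable (Spec_lights_match lights buttons_pressed out) := by unfold Spec_lights_match; infer_instance

-- ===== CLAIM (what is proved, stated in full; the proofs are below) =====
def Claim_equal_lights_match : Prop := ∀ (lights : String) (buttons_pressed : List (List Int)), Dom_lights_match lights buttons_pressed → Spec_lights_match lights buttons_pressed (lights_match lights buttons_pressed)

-- ===== LEMMAS AND PROOFS =====

-- A's inner count is the number of buttons containing i
theorem pv_countA (buttons : List (List Int)) (i : Int) :
    buttons.foldl (fun c button => c + (if button.contains i then 1 else 0)) 0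
      = (buttons.countP (fun button => button.contains i) : Int) := by
  have h : (fun (c : Int) button => c + (if (button : List Int).contains i then 1 else 0))
      = (fun c button => if button.contains i then c + 1 else c) := by
    funext c b; split <;> simp
  rw [h, PySem.List.foldl_if_add_one]
  simp

-- count of i in the dedup-flattened toggle list is the number of buttons containing i
theorem pv_count_toggles (buttons : List (List Int)) (i : Int) :
    (buttons.flatMap PySem.List.dedup).count i
      = buttons.countP (fun button => button.contains i) := by
  induction buttons with
  | nil => simp
  | cons b bs ih =>
    rw [List.flatMap_cons, List.count_append, List.countP_cons, ih]
    by_cases hm : i ∈ b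
    · rw [List.count_eq_one_of_mem (PySem.List.nodup_dedup b)
        ((PySem.List.mem_dedup b i).2 hm)]
      simp [hm]
      omega
    · rw [List.count_eq_zero_of_not_mem (fun hc => hm ((PySem.List.mem_dedup b i).1 hc))]
      simp [hm]

-- pointwise all-check over enumerate ≡ list equality with the range-map
theorem pv_enum_all (cs : List Char) (f : Int → Char) (s : Int) :
    ((PySem.List.enumerate cs s).all (fun p => p.2 == f p.1))
      = (cs == (PySem.List.pyRange s (s + cs.length) 1).map f) := by
  induction cs generalizing s with
  | nil => simp [PySem.List.enumerate, PySem.List.pyRange_one_eq_nil]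
  | cons c cs ih =>
    rw [PySem.List.enumerate_cons]
    have hlt : s < s + ((c :: cs).length : Int) := by simp
    rw [PySem.List.pyRange_one_cons hlt, List.map_cons]
    have harith : s + ((c :: cs).length : Int) = (s + 1) + (cs.length : Int) := by
      simp; omega
    rw [harith, List.all_cons, ih (s + 1), List.cons_beq_cons]

-- the s = 0 instance, with 0 + len normalised, oriented for the final rewrite
theorem pv_enum_all0 (cs : List Char) (f : Int → Char) :
    (cs == (PySem.List.pyRange 0 (cs.length : Int) 1).map f)
      = ((PySem.List.enumerate cs 0).all (fun p => p.2 == f p.1)) := by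
  rw [pv_enum_all cs f 0, zero_add]

theorem lights_match_eq (lights : String) (buttons_pressed : List (List Int)) :
    lights_match lights buttons_pressed = lights_match_alt lights buttons_pressed := by
  unfold lights_match lights_match_alt
  simp only [PySem.List.foldl_append_singleton_eq_map, List.nil_append,
    PySem.List.foldl_append_eq_flatMap, pv_countA,
    PySem.Dict.getD_foldl_insert_add_one, PySem.Dict.getD_empty, zero_add,
    pv_count_toggles, PySem.Str.len_eq]
  exact pv_enum_all0 lights.toList _

-- ===== VERDICT (by name: the statement is the Claim_ definition above) =====
theorem lights_match_spec : Claim_equal_lights_match := by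
  intro lights buttons _
  unfold Spec_lights_match
  exact lights_match_eq lights buttons
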